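-- pv_equiv track=rewrite | github.com/m3n3sx/faktulove3 | faktury/services/invoice_field_extractor.py | _identify_line_items_section
-- ===== SOURCE A (Python) =====
-- from typing import Dict, List, Any, Optional, Tuple, Union
--
-- def _identify_line_items_section(lines: List[str]) -> List[str]:
--     """Identify the section containing line items"""
--     table_indicators = [
--         'lp', 'l.p.', 'nazwa', 'opis', 'ilość', 'ilosc', 'j.m.', 'jednostka',
--         'cena', 'wartość', 'wartosc', 'vat', 'brutto', 'netto'
--     ]
--
--     start_idx = None
--     end_idx = None
--
--     # Find start of table
--     for i, line in enumerate(lines):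
--         line_lower = line.lower()
--         if any(indicator in line_lower for indicator in table_indicators):
--             # Check if this line contains multiple indicators (likely header)
--             indicator_count = sum(1 for indicator in table_indicators if indicator in line_lower)
--             if indicator_count >= 3:
--                 start_idx = i + 1  # Start after header
--                 break
--
--     if start_idx is None:
--         return []
--
--     # Find end of table (look for summary terms)
--     summary_terms = ['suma', 'razem', 'łącznie', 'do zapłaty', 'podsumowanie']
--     for i in range(start_idx, len(lines)):
--         line_lower = lines[i].lower()
--         if any(term in line_lower for term in summary_terms):
--             end_idx = i
--             break
--
--     if end_idx is None:
--         end_idx = len(lines)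
--
--     return lines[start_idx:end_idx]
-- ===== SOURCE B (Python) =====
-- from typing import List
--
-- def _identify_line_items_section(lines: List[str]) -> List[str]:
--     """Single pass with a phase flag: search for the header, then collect until a summary row."""
--     table_indicators = [
--         'lp', 'l.p.', 'nazwa', 'opis', 'ilość', 'ilosc', 'j.m.', 'jednostka',
--         'cena', 'wartość', 'wartosc', 'vat', 'brutto', 'netto'
--     ]
--     summary_terms = ['suma', 'razem', 'łącznie', 'do zapłaty', 'podsumowanie']
--
--     def is_header(line):
--         low = line.lower()
--         return sum(1 for ind in table_indicators if ind in low) >= 3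
--
--     def is_summary(line):
--         low = line.lower()
--         return any(term in low for term in summary_terms)
--
--     collecting = False
--     out = []
--     for line in lines:
--         if not collecting:
--             if is_header(line):
--                 collecting = True
--         elif is_summary(line):
--             return out
--         else:
--             out.append(line)
--     return out if collecting else []
-- ===== Notes on version B (the rewrite author's own statement) =====
-- stated objective: simpler
-- what changed: Replaced A's two separate index-based scans (enumerate to find the header index, then a range loop to find the summary index, then a slice) by one pass over the lines with a collecting flag that accumulates the result directly, dropping the redundant any(...) guard.
import Mathlib
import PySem

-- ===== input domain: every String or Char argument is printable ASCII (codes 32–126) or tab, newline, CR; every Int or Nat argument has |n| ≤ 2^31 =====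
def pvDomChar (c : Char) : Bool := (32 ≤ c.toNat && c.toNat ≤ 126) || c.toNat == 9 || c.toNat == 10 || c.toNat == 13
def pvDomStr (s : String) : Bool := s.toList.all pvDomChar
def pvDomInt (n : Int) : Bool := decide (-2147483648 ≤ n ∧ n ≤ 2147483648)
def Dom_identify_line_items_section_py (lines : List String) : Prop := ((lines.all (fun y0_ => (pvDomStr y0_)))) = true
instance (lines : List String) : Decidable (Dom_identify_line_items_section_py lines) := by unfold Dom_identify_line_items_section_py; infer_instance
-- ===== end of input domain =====

-- B fuses A's two index-based scans and final slice into one pass with a phase flag that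
-- accumulates the result directly (objective: simpler; same asymptotic cost).

-- ===== PORT A =====
def pvIndicators : List String :=
  ["lp", "l.p.", "nazwa", "opis", "ilość", "ilosc", "j.m.", "jednostka",
   "cena", "wartość", "wartosc", "vat", "brutto", "netto"]

def pvSummaryTerms : List String := ["suma", "razem", "łącznie", "do zapłaty", "podsumowanie"]

-- 'for i, line in enumerate(lines): …' searching for the header row
def pvFindStart : List String → Nat → Option Nat
  | [], _ => none
  | line :: rest, i =>
    if pvIndicators.any (fun ind => PySem.Str.isIn ind (PySem.Str.lower line)) then
      if 3 ≤ pvIndicators.countP (fun ind => PySem.Str.isIn ind (PySem.Str.lower line)) then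
        some (i + 1)
      else pvFindStart rest (i + 1)
    else pvFindStart rest (i + 1)

-- 'for i in range(start_idx, len(lines)): …' searching for a summary row
def pvFindEnd (lines : List String) (i : Nat) : Option Nat :=
  if _h : i < lines.length then
    if pvSummaryTerms.any
        (fun t => PySem.Str.isIn t (PySem.Str.lower ((PySem.List.pyGet? lines (i : Int)).getD ""))) then
      some i
    else pvFindEnd lines (i + 1)
  else none
termination_by lines.length - i

def identify_line_items_section_py (lines : List String) : List String :=
  match pvFindStart lines 0 with
  | none => []
  | some start_idx =>
    let end_idx := (pvFindEnd lines start_idx).getD lines.length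
    PySem.List.slice lines (some (start_idx : Int)) (some (end_idx : Int))

-- ===== PORT B =====
def pvIsHeader (line : String) : Bool :=
  3 ≤ pvIndicators.countP (fun ind => PySem.Str.isIn ind (PySem.Str.lower line))

def pvIsSummary (line : String) : Bool :=
  pvSummaryTerms.any (fun t => PySem.Str.isIn t (PySem.Str.lower line))

-- single pass: collecting = False → search for the header; True → collect until a summary row
def pvAltLoop (collecting : Bool) (out : List String) : List String → List String
  | [] => if collecting then out else []
  | line :: rest =>
    if !collecting then
      if pvIsHeader line then pvAltLoop true out rest else pvAltLoop false out rest
    else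
      if pvIsSummary line then out else pvAltLoop collecting (out ++ [line]) rest

def identify_line_items_section_py_alt (lines : List String) : List String :=
  pvAltLoop false [] lines

-- ===== PRECONDITION & SPEC =====
def Spec_identify_line_items_section_py (lines : List String) (out : List String) : Prop := out = identify_line_items_section_py_alt lines
instance (lines : List String) (out : List String) : Decidable (Spec_identify_line_items_section_py lines out) := by unfold Spec_identify_line_items_section_py; infer_instance

-- ===== CLAIM (what is proved, stated in full; the proofs are below) =====
def Claim_equal_identify_line_items_section_py : Prop := ∀ (lines : List String), Dom_identify_line_items_section_py lines → Spec_identify_line_items_section_py lines (identify_line_items_section_py lines)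

-- ===== LEMMAS AND PROOFS =====

-- the accumulator of the collecting phase is a plain prefix of the result
theorem pvAltLoop_true_acc (ms : List String) : ∀ out : List String,
    pvAltLoop true out ms = out ++ pvAltLoop true [] ms := by
  induction ms with
  | nil => intro out; simp [pvAltLoop]
  | cons m ms ih =>
    intro out
    by_cases h : pvIsSummary m = true
    · simp [pvAltLoop, h]
    · simp only [pvAltLoop, Bool.not_true, Bool.false_eq_true, if_false, h]
      rw [ih (out ++ [m]), ih ([] ++ [m])]
      simp

theorem pvAltLoop_true_cons (l : String) (ls : List String) (h : pvIsSummary l = false) :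
    pvAltLoop true [] (l :: ls) = l :: pvAltLoop true [] ls := by
  simp only [pvAltLoop, Bool.not_true, Bool.false_eq_true, if_false, h]
  rw [pvAltLoop_true_acc ls ([] ++ [l])]
  simp

theorem pvFindEnd_ge (lines : List String) (i : Nat) :
    ∀ j, pvFindEnd lines i = some j → i ≤ j := by
  fun_induction pvFindEnd lines i with
  | case1 i h hs => intro j he; simp at he; omega
  | case2 i h hs ih => intro j he; exact Nat.le_of_succ_le (ih j he)
  | case3 i h => intro j he; simp at he

-- A's summary scan + slice over the suffix starting at s equals B's collecting phase there
theorem pvCollect (lines : List String) (s : Nat) :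
    s ≤ lines.length →
    PySem.List.slice lines (some (s : Int))
        (some (((pvFindEnd lines s).getD lines.length : Nat) : Int))
      = pvAltLoop true [] (lines.drop s) := by
  fun_induction pvFindEnd lines s with
  | case1 s h hsum =>
    intro _
    have hget : lines[s]? = some lines[s] := List.getElem?_eq_getElem h
    have hdrop : lines.drop s = lines[s] :: lines.drop (s + 1) := List.drop_eq_getElem_cons h
    have hsum' : pvIsSummary lines[s] = true := by
      simpa [pvIsSummary, PySem.List.pyGet?_natCast, hget] using hsum
    rw [PySem.List.slice_natCast, hdrop]
    simp [pvAltLoop, hsum']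
  | case2 s h hsum ih =>
    intro _
    have hget : lines[s]? = some lines[s] := List.getElem?_eq_getElem h
    have hdrop : lines.drop s = lines[s] :: lines.drop (s + 1) := List.drop_eq_getElem_cons h
    have hsum' : pvIsSummary lines[s] = false := by
      simpa [pvIsSummary, PySem.List.pyGet?_natCast, hget] using hsum
    have hend : s + 1 ≤ (pvFindEnd lines (s + 1)).getD lines.length := by
      cases he : pvFindEnd lines (s + 1) with
      | none => simpa using h
      | some j => simpa using pvFindEnd_ge lines (s + 1) j he
    have ih' := ih (by omega)
    rw [PySem.List.slice_natCast] at ih' ⊢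
    rw [hdrop]
    have htake : (pvFindEnd lines (s + 1)).getD lines.length - s
        = ((pvFindEnd lines (s + 1)).getD lines.length - (s + 1)) + 1 := by omega
    rw [htake, List.take_succ_cons, ih', pvAltLoop_true_cons lines[s] _ hsum']
  | case3 s h =>
    intro hs
    have hdrop : lines.drop s = [] := List.drop_eq_nil_of_le (by omega)
    rw [PySem.List.slice_natCast, hdrop]
    simp [pvAltLoop]

-- countP ≥ 3 forces the redundant 'any' guard in A to be true
theorem pvAny_of_header (ll : String)
    (h : 3 ≤ pvIndicators.countP (fun ind => PySem.Str.isIn ind ll)) :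
    pvIndicators.any (fun ind => PySem.Str.isIn ind ll) = true := by
  have hpos : 0 < pvIndicators.countP (fun ind => PySem.Str.isIn ind ll) := by omega
  rw [List.countP_pos_iff] at hpos
  obtain ⟨a, ha, hpa⟩ := hpos
  exact List.any_eq_true.mpr ⟨a, ha, hpa⟩

-- the searching phases agree: A's match-on-findStart equals B's loop, over any suffix
theorem pvSearch (ls : List String) : ∀ (lines : List String) (i : Nat),
    lines.drop i = ls →
    (match pvFindStart ls i with
     | none => []
     | some start_idx =>
       PySem.List.slice lines (some (start_idx : Int))
         (some (((pvFindEnd lines start_idx).getD lines.length : Nat) : Int)))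
      = pvAltLoop false [] ls := by
  induction ls with
  | nil => intro lines i _; simp [pvFindStart, pvAltLoop]
  | cons l ls ih =>
    intro lines i hdrop
    have hi : i < lines.length := by
      by_contra hc
      rw [List.drop_eq_nil_of_le (by omega)] at hdrop
      simp at hdrop
    have hdrop' : lines.drop (i + 1) = ls := by
      have h1 : (lines.drop i).tail = lines.drop (i + 1) := by rw [List.tail_drop]
      rw [← h1, hdrop]
      rfl
    by_cases hh : pvIsHeader l = true
    · -- header found at index i: start = i + 1
      unfold pvIsHeader at hh
      have hcnt : 3 ≤ pvIndicators.countP (fun ind => PySem.Str.isIn ind (PySem.Str.lower l)) :=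
        of_decide_eq_true hh
      have hany := pvAny_of_header (PySem.Str.lower l) hcnt
      have hfs : pvFindStart (l :: ls) i = some (i + 1) := by
        rw [pvFindStart]
        simp only [hany, if_pos hcnt]
        simp
      rw [hfs]
      show PySem.List.slice lines (some ((i + 1 : Nat) : Int))
          (some (((pvFindEnd lines (i + 1)).getD lines.length : Nat) : Int))
        = pvAltLoop false [] (l :: ls)
      rw [pvCollect lines (i + 1) (by omega), hdrop']
      have hh' : pvIsHeader l = true := by unfold pvIsHeader; exact hh
      simp [pvAltLoop, hh']
    · -- not a header: both sides recurse on the tail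
      have hh0 : pvIsHeader l = false := by
        cases hb : pvIsHeader l
        · rfl
        · exact absurd hb hh
      unfold pvIsHeader at hh0
      have hcnt : ¬ 3 ≤ pvIndicators.countP (fun ind => PySem.Str.isIn ind (PySem.Str.lower l)) :=
        of_decide_eq_false hh0
      have hstep : pvFindStart (l :: ls) i = pvFindStart ls (i + 1) := by
        rw [pvFindStart]
        by_cases hany : pvIndicators.any (fun ind => PySem.Str.isIn ind (PySem.Str.lower l)) = true
        · simp only [hany, if_neg hcnt]
          simp
        · simp only [Bool.eq_false_iff.mpr hany]
          simp
      rw [hstep, ih lines (i + 1) hdrop']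
      have hh' : pvIsHeader l = false := by
        cases hb : pvIsHeader l
        · rfl
        · exact absurd hb hh
      simp [pvAltLoop, hh']

-- ===== VERDICT (by name: the statement is the Claim_ definition above) =====
theorem identify_line_items_section_py_spec : Claim_equal_identify_line_items_section_py := by
  intro lines _
  unfold Spec_identify_line_items_section_py identify_line_items_section_py
    identify_line_items_section_py_alt
  simpa using pvSearch lines lines 0 (by simp)
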